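-- pv_equiv track=rewrite | github.com/aStank85/jakal | web/app.py | _integrity_counters
-- ===== SOURCE A (Python) =====
-- def _integrity_counters(rows: list[dict]) -> dict:
--     rounds: dict[tuple[str, int], dict] = {}
--     for r in rows:
--         key = (str(r.get("match_id")), int(r.get("round_id") or 0))
--         b = rounds.setdefault(key, {"players": 0, "atk": 0, "def": 0, "ops_missing": 0, "winner_side": str(r.get("winner_side") or "").lower()})
--         b["players"] += 1
--         side = str(r.get("side") or "").lower()
--         if side == "attacker":
--             b["atk"] += 1
--         elif side == "defender":
--             b["def"] += 1
--         if not str(r.get("operator") or "").strip():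
--             b["ops_missing"] += 1
--     counters = {
--         "rounds_total": len(rounds),
--         "rounds_missing_players": 0,
--         "rounds_not_5v5": 0,
--         "rounds_missing_operator_entries": 0,
--         "rounds_invalid_winner_side": 0,
--     }
--     for b in rounds.values():
--         if b["players"] < 10:
--             counters["rounds_missing_players"] += 1
--         if b["atk"] != 5 or b["def"] != 5:
--             counters["rounds_not_5v5"] += 1
--         if b["ops_missing"] > 0:
--             counters["rounds_missing_operator_entries"] += 1
--         if b["winner_side"] not in {"attacker", "defender"}:
--             counters["rounds_invalid_winner_side"] += 1
--     return counters
-- ===== SOURCE B (Python) =====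
-- def _integrity_counters(rows: list[dict]) -> dict:
--     # Pass 1: only partition rows into per-round groups (insertion order).
--     groups: dict[tuple[str, int], list] = {}
--     for r in rows:
--         key = (str(r.get("match_id")), int(r.get("round_id") or 0))
--         groups.setdefault(key, []).append(r)
--     # Pass 2: recompute each group's stats and classify it.
--     counters = {
--         "rounds_total": len(groups),
--         "rounds_missing_players": 0,
--         "rounds_not_5v5": 0,
--         "rounds_missing_operator_entries": 0,
--         "rounds_invalid_winner_side": 0,
--     }
--     for g in groups.values():
--         players = len(g)
--         atk = sum(1 for r in g if str(r.get("side") or "").lower() == "attacker")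
--         dfn = sum(1 for r in g if str(r.get("side") or "").lower() == "defender")
--         ops_missing = sum(1 for r in g if not str(r.get("operator") or "").strip())
--         winner = str(g[0].get("winner_side") or "").lower()
--         if players < 10:
--             counters["rounds_missing_players"] += 1
--         if atk != 5 or dfn != 5:
--             counters["rounds_not_5v5"] += 1
--         if ops_missing > 0:
--             counters["rounds_missing_operator_entries"] += 1
--         if winner not in ("attacker", "defender"):
--             counters["rounds_invalid_winner_side"] += 1
--     return counters
-- ===== Notes on version B (the rewrite author's own statement) =====
-- stated objective: alternative
-- what changed: B first only partitions the rows into per-round groups and then, in a second pass, recomputes each group's player/side/operator counts with sum-of-generator expressions and classifies it, instead of A's incremental counter mutation inside the grouping loop.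
import Mathlib
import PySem

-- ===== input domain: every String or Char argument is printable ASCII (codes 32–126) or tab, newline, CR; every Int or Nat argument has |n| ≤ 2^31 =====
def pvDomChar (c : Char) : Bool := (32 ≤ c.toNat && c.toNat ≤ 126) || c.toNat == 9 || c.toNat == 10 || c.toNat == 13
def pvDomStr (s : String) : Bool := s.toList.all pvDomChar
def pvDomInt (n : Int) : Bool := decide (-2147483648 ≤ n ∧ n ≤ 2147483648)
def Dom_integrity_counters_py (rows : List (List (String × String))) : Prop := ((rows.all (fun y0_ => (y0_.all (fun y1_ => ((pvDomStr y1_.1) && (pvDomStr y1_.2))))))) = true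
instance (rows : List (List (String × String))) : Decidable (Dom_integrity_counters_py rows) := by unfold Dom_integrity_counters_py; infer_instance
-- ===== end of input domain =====

-- B regroups the rows first and recomputes each round's stats in a second pass
-- (alternative decomposition, same cost); equivalence is about the return value only.


-- shared helpers: the row-field expressions both Pythons contain verbatim
-- r.get(k) on a dict given as an association list (first match)
def pvGet (r : List (String × String)) (k : String) : Option String :=
  (r.find? (fun p => p.1 == k)).map (·.2)

-- str(r.get("match_id"))  (str(None) = "None")
def pvMatchKey (r : List (String × String)) : String :=
  (pvGet r "match_id").getD "None"

-- int(r.get("round_id") or 0); none = ValueError of int()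
def pvRoundId? (r : List (String × String)) : Option Int :=
  match pvGet r "round_id" with
  | none => some 0
  | some s => if s = "" then some 0 else PySem.Int.ofStr? s

-- str(r.get("winner_side") or "").lower()
def pvWinner (r : List (String × String)) : String :=
  PySem.Str.lower ((pvGet r "winner_side").getD "")

-- str(r.get("side") or "").lower()
def pvSide (r : List (String × String)) : String :=
  PySem.Str.lower ((pvGet r "side").getD "")

-- not str(r.get("operator") or "").strip()
def pvOpMissing (r : List (String × String)) : Bool :=
  PySem.Str.strip ((pvGet r "operator").getD "") == ""

-- ===== PORT A =====
-- A's buckets are tuples (players, atk, def, ops_missing, winner_side)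
-- the 'b["players"] += 1 … ops_missing' mutation block of A's first loop
def pvBump (b : Int × Int × Int × Int × String) (r : List (String × String)) :
    Int × Int × Int × Int × String :=
  let b := (b.1 + 1, b.2.1, b.2.2.1, b.2.2.2.1, b.2.2.2.2)
  let b := if pvSide r = "attacker" then (b.1, b.2.1 + 1, b.2.2.1, b.2.2.2.1, b.2.2.2.2)
           else if pvSide r = "defender" then (b.1, b.2.1, b.2.2.1 + 1, b.2.2.2.1, b.2.2.2.2)
           else b
  if pvOpMissing r then (b.1, b.2.1, b.2.2.1, b.2.2.2.1 + 1, b.2.2.2.2) else b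

-- one iteration of A's first loop; none = raised ValueError
def pvAStep (st : Option (PySem.Dict (String × Int) (Int × Int × Int × Int × String)))
    (r : List (String × String)) : Option (PySem.Dict (String × Int) (Int × Int × Int × Int × String)) :=
  match st with
  | none => none
  | some d =>
    match pvRoundId? r with
    | none => none
    | some rid =>
      let key := (pvMatchKey r, rid)
      let d := d.setdefault key (0, 0, 0, 0, pvWinner r)
      let b := pvBump (d.getD key (0, 0, 0, 0, "")) r
      some (d.insert key b)

-- A's second loop: classify each bucket
def pvAClass (c : Int × Int × Int × Int) (b : Int × Int × Int × Int × String) : Int × Int × Int × Int :=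
  let c := if b.1 < 10 then (c.1 + 1, c.2.1, c.2.2.1, c.2.2.2) else c
  let c := if b.2.1 ≠ 5 ∨ b.2.2.1 ≠ 5 then (c.1, c.2.1 + 1, c.2.2.1, c.2.2.2) else c
  let c := if b.2.2.2.1 > 0 then (c.1, c.2.1, c.2.2.1 + 1, c.2.2.2) else c
  if b.2.2.2.2 ≠ "attacker" ∧ b.2.2.2.2 ≠ "defender" then (c.1, c.2.1, c.2.2.1, c.2.2.2 + 1) else c

def integrity_counters_py (rows : List (List (String × String))) : List (String × Int) :=
  match rows.foldl pvAStep (some ⟨[]⟩) with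
  | none => []   -- A raises here; excluded by Pre_
  | some rounds =>
    let c := rounds.values.foldl pvAClass (0, 0, 0, 0)
    [("rounds_total", (rounds.size : Int)),
     ("rounds_missing_players", c.1),
     ("rounds_not_5v5", c.2.1),
     ("rounds_missing_operator_entries", c.2.2.1),
     ("rounds_invalid_winner_side", c.2.2.2)]

-- ===== PORT B =====
-- one iteration of B's grouping loop: groups.setdefault(key, []).append(r)
def pvBStep (st : Option (PySem.Dict (String × Int) (List (List (String × String)))))
    (r : List (String × String)) : Option (PySem.Dict (String × Int) (List (List (String × String)))) :=
  match st with
  | none => none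
  | some d =>
    match pvRoundId? r with
    | none => none
    | some rid => some (d.modify (pvMatchKey r, rid) [] (fun g => g ++ [r]))

-- B's second loop: recompute a group's stats and classify
def pvBClass (c : Int × Int × Int × Int) (g : List (List (String × String))) : Int × Int × Int × Int :=
  let players : Int := g.length
  let atk : Int := g.countP (fun r => pvSide r = "attacker")
  let dfn : Int := g.countP (fun r => pvSide r = "defender")
  let ops : Int := g.countP (fun r => pvOpMissing r)
  let winner := pvWinner (PySem.List.pyGetD g 0 [])
  let c := if players < 10 then (c.1 + 1, c.2.1, c.2.2.1, c.2.2.2) else c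
  let c := if atk ≠ 5 ∨ dfn ≠ 5 then (c.1, c.2.1 + 1, c.2.2.1, c.2.2.2) else c
  let c := if ops > 0 then (c.1, c.2.1, c.2.2.1 + 1, c.2.2.2) else c
  if winner ≠ "attacker" ∧ winner ≠ "defender" then (c.1, c.2.1, c.2.2.1, c.2.2.2 + 1) else c

def integrity_counters_py_alt (rows : List (List (String × String))) : List (String × Int) :=
  match rows.foldl pvBStep (some ⟨[]⟩) with
  | none => []   -- B raises here too; excluded by Pre_
  | some groups =>
    let c := groups.values.foldl pvBClass (0, 0, 0, 0)
    [("rounds_total", (groups.size : Int)),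
     ("rounds_missing_players", c.1),
     ("rounds_not_5v5", c.2.1),
     ("rounds_missing_operator_entries", c.2.2.1),
     ("rounds_invalid_winner_side", c.2.2.2)]

-- ===== PRECONDITION & SPEC =====
-- Pre_ excludes exactly the inputs where int() raises ValueError on a row's round_id (A and B both raise there).
def Pre_integrity_counters_py (rows : List (List (String × String))) : Prop :=
  (rows.all (fun r => (pvRoundId? r).isSome)) = true
instance (rows : List (List (String × String))) : Decidable (Pre_integrity_counters_py rows) := by
  unfold Pre_integrity_counters_py; infer_instance

def pvWitness_integrity_counters_py : (List (List (String × String))) :=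
  [[("match_id", "m1"), ("round_id", "1"), ("side", "Attacker"), ("operator", "ash"), ("winner_side", "Attacker")],
   [("match_id", "m1"), ("round_id", "1"), ("side", "defender"), ("operator", " "), ("winner_side", "attacker")]]

def Spec_integrity_counters_py (rows : List (List (String × String))) (out : List (String × Int)) : Prop := out = integrity_counters_py_alt rows
instance (rows : List (List (String × String))) (out : List (String × Int)) : Decidable (Spec_integrity_counters_py rows out) := by unfold Spec_integrity_counters_py; infer_instance

-- ===== CLAIM (what is proved, stated in full; the proofs are below) =====
def Claim_equal_integrity_counters_py : Prop := ∀ (rows : List (List (String × String))), Dom_integrity_counters_py rows → Pre_integrity_counters_py rows → Spec_integrity_counters_py rows (integrity_counters_py rows)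

-- ===== LEMMAS AND PROOFS =====

-- stats of a group, as A accumulates them
def pvStats (g : List (List (String × String))) : Int × Int × Int × Int × String :=
  ((g.length : Int),
   (g.countP (fun r => pvSide r = "attacker") : Int),
   (g.countP (fun r => pvSide r = "defender") : Int),
   (g.countP (fun r => pvOpMissing r) : Int),
   pvWinner (PySem.List.pyGetD g 0 []))

-- relation between A's dict and B's dict: same keys, A's value is the stats of B's group, groups nonempty
def pvRel (dA : PySem.Dict (String × Int) (Int × Int × Int × Int × String))
    (dB : PySem.Dict (String × Int) (List (List (String × String)))) : Prop :=
  dA.items = dB.items.map (fun p => (p.1, pvStats p.2)) ∧ ∀ p ∈ dB.items, p.2 ≠ []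

theorem pvBump_nil (r : List (String × String)) :
    pvBump (0, 0, 0, 0, pvWinner r) r = pvStats [r] := by
  simp only [pvBump, pvStats, List.countP_cons, List.countP_nil, PySem.List.pyGetD_zero]
  split_ifs <;> simp_all

theorem pvBump_append (g : List (List (String × String))) (r : List (String × String))
    (hg : g ≠ []) : pvBump (pvStats g) r = pvStats (g ++ [r]) := by
  obtain ⟨a, t, rfl⟩ := List.exists_cons_of_ne_nil hg
  simp only [pvBump, pvStats, List.countP_append, List.countP_cons, List.countP_nil,
    List.cons_append, List.length_append, List.length_cons, PySem.List.pyGetD_zero, List.getD]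
  split_ifs <;> simp_all

theorem pvRel_step (dA : PySem.Dict (String × Int) (Int × Int × Int × Int × String))
    (dB : PySem.Dict (String × Int) (List (List (String × String))))
    (r : List (String × String)) (rid : Int) (h : pvRel dA dB) (hr : pvRoundId? r = some rid) :
    ∃ dA' dB', pvAStep (some dA) r = some dA' ∧ pvBStep (some dB) r = some dB' ∧ pvRel dA' dB' := by
  obtain ⟨hitems, hne⟩ := h
  simp only [pvAStep, pvBStep, hr]
  refine ⟨_, _, rfl, rfl, ?_⟩
  set key := (pvMatchKey r, rid) with hkey
  have hcont : dA.contains key = dB.contains key := by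
    simp [PySem.Dict.contains, hitems, List.any_map, Function.comp_def]
  have hfind : List.find? (fun p => p.1 == key) dA.items
      = (List.find? (fun p => p.1 == key) dB.items).map (fun p => (p.1, pvStats p.2)) := by
    rw [hitems, List.find?_map]; rfl
  by_cases hc : dB.contains key = true
  · -- existing round: setdefault is a no-op, both sides overwrite the entry in place
    obtain ⟨p0, hp0⟩ : ∃ p0, List.find? (fun p => p.1 == key) dB.items = some p0 := by
      rw [← Option.isSome_iff_exists, List.find?_isSome]
      simpa [PySem.Dict.contains, List.any_eq_true] using hc
    have hp0mem : p0 ∈ dB.items := List.mem_of_find?_eq_some hp0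
    have hp0ne : p0.2 ≠ [] := hne p0 hp0mem
    have hgetB : dB.getD key [] = p0.2 := by
      simp [PySem.Dict.getD, PySem.Dict.get?, hp0]
    have hcA : dA.contains key = true := by rw [hcont]; exact hc
    have hgetA : dA.getD key (0, 0, 0, 0, "") = pvStats p0.2 := by
      simp [PySem.Dict.getD, PySem.Dict.get?, hfind, hp0]
    simp only [PySem.Dict.setdefault, PySem.Dict.modify, hcA, if_true, hgetA, hgetB,
      PySem.Dict.insert, hc, pvBump_append p0.2 r hp0ne]
    constructor
    · simp only [hitems, List.map_map]
      apply List.map_congr_left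
      intro p _
      by_cases hpk : (p.1 == key) = true
      · have heq : p.1 = key := by simpa using hpk
        simp [heq]
      · have heq : ¬ p.1 = key := by simpa using hpk
        simp [heq]
    · intro p hp
      simp only [List.mem_map] at hp
      obtain ⟨q, hq, rfl⟩ := hp
      by_cases hqk : (q.1 == key) = true
      · have heq : q.1 = key := by simpa using hqk
        simp [heq]
      · have heq : ¬ q.1 = key := by simpa using hqk
        simp [heq]
        exact hne q hq
  · -- new round: both sides append a fresh entry
    have hcB : dB.contains key = false := by simpa using hc
    have hcA : dA.contains key = false := by rw [hcont]; exact hcB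
    have hnomatch : ∀ p ∈ dA.items, (p.1 == key) = false := by
      intro p hp
      have := hcA
      simp only [PySem.Dict.contains, List.any_eq_false] at this
      simpa using this p hp
    have hfindA : List.find? (fun p => p.1 == key) dA.items = none :=
      List.find?_eq_none.mpr (by intro p hp; simp [hnomatch p hp])
    have hfindB : List.find? (fun p => p.1 == key) dB.items = none := by
      rw [hfind] at hfindA
      cases hfb : List.find? (fun p => p.1 == key) dB.items <;> simp [hfb] at hfindA ⊢
    have hgetB : dB.getD key [] = [] := by simp [PySem.Dict.getD, PySem.Dict.get?, hfindB]
    simp only [PySem.Dict.setdefault, PySem.Dict.modify, hcA, Bool.false_eq_true,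
      if_false, hgetB]
    have hcA' : (PySem.Dict.mk (dA.items ++ [(key, (0, 0, 0, 0, pvWinner r))])).contains key = true := by
      simp [PySem.Dict.contains]
    have hget' : (PySem.Dict.mk (dA.items ++ [(key, (0, 0, 0, 0, pvWinner r))])).getD key (0, 0, 0, 0, "")
        = (0, 0, 0, 0, pvWinner r) := by
      simp [PySem.Dict.getD, PySem.Dict.get?, List.find?_append, hfindA]
    simp only [PySem.Dict.insert, hcA', hcB, Bool.false_eq_true, if_false, if_true, hget']
    constructor
    · simp only [List.map_append]
      have h1 : List.map (fun p => if (p.1 == key) = true then (key, pvBump (0, 0, 0, 0, pvWinner r) r) else p)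
          dA.items = dA.items :=
        (List.map_congr_left (fun p hp => by simp [hnomatch p hp])).trans (List.map_id _)
      rw [h1, hitems, pvBump_nil]
      simp
    · intro p hp
      rcases List.mem_append.mp hp with hp | hp
      · exact hne p hp
      · simp at hp; subst hp; simp

theorem pv_fold_rel (rows : List (List (String × String)))
    (dA : PySem.Dict (String × Int) (Int × Int × Int × Int × String))
    (dB : PySem.Dict (String × Int) (List (List (String × String))))
    (h : pvRel dA dB) (hp : (rows.all (fun r => (pvRoundId? r).isSome)) = true) :
    ∃ dA' dB', rows.foldl pvAStep (some dA) = some dA' ∧ rows.foldl pvBStep (some dB) = some dB' ∧ pvRel dA' dB' := by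
  induction rows generalizing dA dB with
  | nil => exact ⟨dA, dB, rfl, rfl, h⟩
  | cons r rest ih =>
    simp only [List.all_cons, Bool.and_eq_true] at hp
    obtain ⟨rid, hrid⟩ := Option.isSome_iff_exists.mp hp.1
    obtain ⟨dA', dB', hA, hB, hrel⟩ := pvRel_step dA dB r rid h hrid
    obtain ⟨dA'', dB'', hA', hB', hrel'⟩ := ih dA' dB' hrel hp.2
    exact ⟨dA'', dB'', by simp [List.foldl_cons, hA, hA'], by simp [List.foldl_cons, hB, hB'], hrel'⟩

theorem pvClass_stats (c : Int × Int × Int × Int) (g : List (List (String × String))) :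
    pvAClass c (pvStats g) = pvBClass c g := rfl

-- ===== VERDICT (by name: the statement is the Claim_ definition above) =====
theorem integrity_counters_py_spec : Claim_equal_integrity_counters_py := by
  intro rows _ hp
  unfold Spec_integrity_counters_py
  obtain ⟨dA, dB, hA, hB, hrel⟩ := pv_fold_rel rows ⟨[]⟩ ⟨[]⟩ ⟨rfl, by simp⟩ hp
  obtain ⟨hrel, -⟩ := hrel
  unfold integrity_counters_py integrity_counters_py_alt
  rw [hA, hB]
  have hvals : dA.values = dB.values.map pvStats := by
    simp [PySem.Dict.values, hrel, List.map_map, Function.comp_def]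
  have hsize : dA.size = dB.size := by
    simp [PySem.Dict.size, hrel]
  have hfold : dA.values.foldl pvAClass (0,0,0,0) = dB.values.foldl pvBClass (0,0,0,0) := by
    rw [hvals, List.foldl_map]
    apply List.foldl_ext
    intro c g _
    exact pvClass_stats c g
  simp only [hsize, hfold]
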